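-- pv_equiv track=rewrite | github.com/qcg1999/LING-573-Project | src/content_realization.py | realize
-- ===== SOURCE A (Python) =====
-- def realize(ranked_sentence_tuples, max_words=100):
-- 	summary = ''
-- 	for sentence_tuple in ranked_sentence_tuples:
-- 		sentence = _clean(sentence_tuple[1])
-- 		if len(('%s %s' % (summary,sentence)).split()) > max_words:
-- 			break
-- 		summary = '%s\n%s' % (summary,sentence)
-- 	return summary.strip()
--
-- def _clean(sentence):
-- 	sentence = sentence.replace('\n',' ').strip()
-- 	return sentence
-- ===== SOURCE B (Python) =====
-- def realize(ranked_sentence_tuples, max_words=100):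
--     cleaned = [s.replace('\n', ' ').strip() for _, s in ranked_sentence_tuples]
--     counts = [len(c.split()) for c in cleaned]
--     prefix = []
--     running = 0
--     for w in counts:
--         running += w
--         prefix.append(running)
--     n = next((i for i, t in enumerate(prefix) if t > max_words), len(prefix))
--     return '\n'.join(cleaned[:n]).strip()
-- ===== Notes on version B (the rewrite author's own statement) =====
-- stated objective: faster
-- what changed: B cleans all sentences once, takes prefix sums of their word counts, cuts at the first sum exceeding max_words and joins the kept prefix, instead of A's loop that rebuilds and re-splits the whole growing summary string on every iteration.
import Mathlib
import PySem

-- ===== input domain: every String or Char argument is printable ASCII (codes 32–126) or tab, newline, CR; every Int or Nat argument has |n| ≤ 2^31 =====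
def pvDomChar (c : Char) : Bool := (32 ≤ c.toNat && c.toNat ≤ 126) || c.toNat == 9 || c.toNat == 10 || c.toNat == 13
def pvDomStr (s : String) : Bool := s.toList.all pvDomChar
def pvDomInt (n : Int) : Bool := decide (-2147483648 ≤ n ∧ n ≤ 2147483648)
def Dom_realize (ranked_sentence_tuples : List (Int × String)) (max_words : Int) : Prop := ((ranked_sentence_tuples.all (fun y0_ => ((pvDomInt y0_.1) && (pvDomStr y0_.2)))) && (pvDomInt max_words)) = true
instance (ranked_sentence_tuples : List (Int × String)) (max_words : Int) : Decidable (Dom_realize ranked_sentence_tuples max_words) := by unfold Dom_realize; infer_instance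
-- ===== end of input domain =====

-- B replaces A's quadratic rebuild-and-resplit of the growing summary by cleaning every
-- sentence once, taking prefix sums of the word counts, cutting at the first overflow and
-- joining the kept prefix (objective: faster).

-- ===== PORT A =====
-- _clean(sentence)
def realize_clean (sentence : String) : String :=
  PySem.Str.strip (PySem.Str.replace sentence "\n" " ")

-- the for-loop of A, with 'break' as an early return of summary
def realize_loop (max_words : Int) : List (Int × String) → String → String
  | [], summary => summary
  | sentence_tuple :: rest, summary =>
    let sentence := realize_clean sentence_tuple.2
    if PySem.List.len (PySem.Str.split₀ (PySem.Str.join " " [summary, sentence])) > max_words then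
      summary
    else
      realize_loop max_words rest (PySem.Str.join "\n" [summary, sentence])

def realize (ranked_sentence_tuples : List (Int × String)) (max_words : Int) : String :=
  PySem.Str.strip (realize_loop max_words ranked_sentence_tuples "")

-- ===== PORT B =====
def realize_alt (ranked_sentence_tuples : List (Int × String)) (max_words : Int) : String :=
  let cleaned := ranked_sentence_tuples.map
    (fun t => PySem.Str.strip (PySem.Str.replace t.2 "\n" " "))
  let counts := cleaned.map (fun c => PySem.List.len (PySem.Str.split₀ c))
  -- the running/prefix.append loop of Source B
  let prefixSums := (counts.foldl
    (fun (acc : List Int × Int) w => (acc.1 ++ [acc.2 + w], acc.2 + w)) ([], 0)).1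
  -- next((i for i, t in enumerate(prefix) if t > max_words), len(prefix))
  let n := (prefixSums.findIdx? (fun t => max_words < t)).getD prefixSums.length
  PySem.Str.strip (PySem.Str.join "\n" (cleaned.take n))

-- ===== PRECONDITION & SPEC =====
def Spec_realize (ranked_sentence_tuples : List (Int × String)) (max_words : Int) (out : String) : Prop := out = realize_alt ranked_sentence_tuples max_words
instance (ranked_sentence_tuples : List (Int × String)) (max_words : Int) (out : String) : Decidable (Spec_realize ranked_sentence_tuples max_words out) := by unfold Spec_realize; infer_instance

-- ===== CLAIM (what is proved, stated in full; the proofs are below) =====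
def Claim_equal_realize : Prop := ∀ (ranked_sentence_tuples : List (Int × String)) (max_words : Int), Dom_realize ranked_sentence_tuples max_words → Spec_realize ranked_sentence_tuples max_words (realize ranked_sentence_tuples max_words)

-- ===== LEMMAS AND PROOFS =====

-- word count of a char list, Python len(s.split())
def pvWc (s : List Char) : Nat := (PySem.Chars.split₀ s).length

theorem pv_go_acc (xs : List Char) : ∀ (cur : List Char) (acc : List (List Char)),
    PySem.Chars.split₀.go xs cur acc = acc.reverse ++ PySem.Chars.split₀.go xs cur [] := by
  induction xs with
  | nil =>
    intro cur acc
    simp only [PySem.Chars.split₀.go]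
    by_cases h : cur.isEmpty <;> simp [h]
  | cons c rest ih =>
    intro cur acc
    simp only [PySem.Chars.split₀.go]
    by_cases hs : PySem.Chars.isspace c
    · by_cases h : cur.isEmpty <;> simp only [hs, h, if_true, if_false, ite_true, ite_false]
      · exact ih [] acc
      · rw [ih [] (cur.reverse :: acc), ih [] [cur.reverse]]
        simp
    · simp only [hs, ite_false, Bool.false_eq_true]
      exact ih (c :: cur) acc

theorem pv_go_ws_append (c : Char) (hc : PySem.Chars.isspace c = true) (ys : List Char)
    (xs : List Char) : ∀ (cur : List Char) (acc : List (List Char)),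
    PySem.Chars.split₀.go (xs ++ c :: ys) cur acc
      = PySem.Chars.split₀.go xs cur acc ++ PySem.Chars.split₀ ys := by
  induction xs with
  | nil =>
    intro cur acc
    simp only [List.nil_append]
    rw [show PySem.Chars.split₀.go (c :: ys) cur acc
        = if PySem.Chars.isspace c then
            (if cur.isEmpty then PySem.Chars.split₀.go ys [] acc
             else PySem.Chars.split₀.go ys [] (cur.reverse :: acc))
          else PySem.Chars.split₀.go ys (c :: cur) acc from rfl]
    rw [show PySem.Chars.split₀.go [] cur acc
        = if cur.isEmpty then acc.reverse else (cur.reverse :: acc).reverse from rfl]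
    simp only [hc, if_true]
    by_cases h : cur.isEmpty <;> simp only [h, ite_true, ite_false]
    · exact pv_go_acc ys [] acc
    · rw [pv_go_acc ys [] (cur.reverse :: acc)]; simp [PySem.Chars.split₀]
  | cons c' rest ih =>
    intro cur acc
    simp only [List.cons_append]
    rw [show PySem.Chars.split₀.go (c' :: (rest ++ c :: ys)) cur acc
        = if PySem.Chars.isspace c' then
            (if cur.isEmpty then PySem.Chars.split₀.go (rest ++ c :: ys) [] acc
             else PySem.Chars.split₀.go (rest ++ c :: ys) [] (cur.reverse :: acc))
          else PySem.Chars.split₀.go (rest ++ c :: ys) (c' :: cur) acc from rfl]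
    rw [show PySem.Chars.split₀.go (c' :: rest) cur acc
        = if PySem.Chars.isspace c' then
            (if cur.isEmpty then PySem.Chars.split₀.go rest [] acc
             else PySem.Chars.split₀.go rest [] (cur.reverse :: acc))
          else PySem.Chars.split₀.go rest (c' :: cur) acc from rfl]
    by_cases hs : PySem.Chars.isspace c' <;> by_cases h : cur.isEmpty <;>
      simp only [hs, h, ite_true, ite_false, if_true, if_false] <;> apply ih

theorem pv_wc_ws_append (c : Char) (hc : PySem.Chars.isspace c = true)
    (xs ys : List Char) : pvWc (xs ++ c :: ys) = pvWc xs + pvWc ys := by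
  unfold pvWc PySem.Chars.split₀
  rw [pv_go_ws_append c hc ys xs [] []]
  simp [PySem.Chars.split₀]

-- chars-level version of A's loop (sentences already cleaned)
def pvLoopC (mw : Int) : List (List Char) → List Char → List Char
  | [], s => s
  | c :: cs, s =>
    if (pvWc (s ++ ' ' :: c) : Int) > mw then s else pvLoopC mw cs (s ++ '\n' :: c)

-- number of leading cleaned sentences A keeps, starting from b words already used
def pvCut (mw : Int) (b : Int) : List (List Char) → Nat
  | [] => 0
  | c :: cs => if b + (pvWc c : Int) > mw then 0 else pvCut mw (b + (pvWc c : Int)) cs + 1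

theorem pv_isspace_space : PySem.Chars.isspace ' ' = true := by decide
theorem pv_isspace_nl : PySem.Chars.isspace '\n' = true := by decide

theorem pv_loopC_eq (mw : Int) (cs : List (List Char)) : ∀ (s : List Char),
    pvLoopC mw cs s
      = (cs.take (pvCut mw (pvWc s : Int) cs)).foldl (fun t c => t ++ '\n' :: c) s := by
  induction cs with
  | nil => intro s; simp [pvLoopC, pvCut]
  | cons c rest ih =>
    intro s
    simp only [pvLoopC, pvCut, pv_wc_ws_append ' ' pv_isspace_space s c]
    by_cases h : ((pvWc s + pvWc c : Nat) : Int) > mw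
    · rw [if_pos (by push_cast at h ⊢; omega), if_pos (by push_cast at h ⊢; omega)]
      simp
    · rw [if_neg (by push_cast at h ⊢; omega), if_neg (by push_cast at h ⊢; omega)]
      rw [ih (s ++ '\n' :: c)]
      rw [pv_wc_ws_append '\n' pv_isspace_nl s c]
      have : ((pvWc s : Int) + (pvWc c : Int)) = ((pvWc s + pvWc c : Nat) : Int) := by push_cast; ring
      rw [this]
      simp [List.foldl]

theorem pv_foldl_flat (l : List (List Char)) : ∀ (s : List Char),
    l.foldl (fun t c => t ++ '\n' :: c) s = s ++ l.flatMap (fun c => '\n' :: c) := by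
  induction l with
  | nil => intro s; simp
  | cons a t ih => intro s; simp [ih, List.flatMap_cons]

theorem pv_flat_join : ∀ (rest : List (List Char)) (a : List Char),
    (a :: rest).flatMap (fun c => '\n' :: c) = '\n' :: PySem.Chars.join ['\n'] (a :: rest) := by
  intro rest
  induction rest with
  | nil =>
    intro a
    simp [PySem.Chars.join_singleton, List.flatMap_cons]
  | cons b t ih =>
    intro a
    rw [show (a :: b :: t).flatMap (fun c => '\n' :: c)
        = ('\n' :: a) ++ (b :: t).flatMap (fun c => '\n' :: c) from by
      simp [List.flatMap_cons]]
    rw [ih b, PySem.Chars.join_cons_cons]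
    simp

theorem pv_strip_nl_cons (s : List Char) :
    PySem.Chars.strip ('\n' :: s) = PySem.Chars.strip s := by
  simp [PySem.Chars.strip, PySem.Chars.lstrip, pv_isspace_nl]

-- B-side: prefix-sum scan
def pvScan (r : Int) : List Int → List Int
  | [] => []
  | w :: t => (r + w) :: pvScan (r + w) t

theorem pv_prefix_foldl (ws : List Int) : ∀ (acc : List Int) (r : Int),
    (ws.foldl (fun (a : List Int × Int) w => (a.1 ++ [a.2 + w], a.2 + w)) (acc, r)).1
      = acc ++ pvScan r ws := by
  induction ws with
  | nil => intro acc r; simp [pvScan]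
  | cons w t ih => intro acc r; simp [List.foldl, pvScan, ih]

theorem pv_scan_len (ws : List Int) : ∀ r, (pvScan r ws).length = ws.length := by
  induction ws with
  | nil => intro r; simp [pvScan]
  | cons w t ih => intro r; simp [pvScan, ih]

theorem pv_cut_eq (mw : Int) (cs : List (List Char)) : ∀ (b : Int),
    ((pvScan b (cs.map (fun c => (pvWc c : Int)))).findIdx? (fun t => mw < t)).getD
        (pvScan b (cs.map (fun c => (pvWc c : Int)))).length
      = pvCut mw b cs := by
  induction cs with
  | nil => intro b; simp [pvScan, pvCut]
  | cons c rest ih =>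
    intro b
    simp only [List.map_cons, pvScan, pvCut, List.findIdx?_cons]
    by_cases h : mw < b + (pvWc c : Int)
    · rw [if_pos (by simpa using h), if_pos (by omega)]
      simp
    · rw [if_neg (by simpa using h), if_neg (by omega)]
      rw [← ih (b + (pvWc c : Int))]
      cases hfi : (pvScan (b + (pvWc c : Int)) (rest.map (fun c => (pvWc c : Int)))).findIdx?
          (fun t => mw < t) <;> simp [pv_scan_len]

-- bridges String ↔ List Char
theorem pv_len_split₀ (x : String) :
    PySem.List.len (PySem.Str.split₀ x) = (pvWc x.toList : Int) := by
  have h := congrArg List.length (PySem.Str.split₀_map_toList x)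
  simp only [List.length_map] at h
  simp [PySem.List.len, pvWc, h]

theorem pv_join2 (sep a b : String) :
    (PySem.Str.join sep [a, b]).toList = a.toList ++ sep.toList ++ b.toList := by
  simp [PySem.Str.toList_join, PySem.Chars.join_cons_cons, PySem.Chars.join_singleton]

def pvCleanC (t : Int × String) : List Char :=
  PySem.Chars.strip (PySem.Chars.replace t.2.toList ['\n'] [' '])

theorem pv_clean_toList (t : Int × String) : (realize_clean t.2).toList = pvCleanC t := by
  simp [realize_clean, pvCleanC, PySem.Str.toList_strip, PySem.Str.toList_replace]

theorem pv_loop_toList (mw : Int) (l : List (Int × String)) : ∀ (s : String),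
    (realize_loop mw l s).toList = pvLoopC mw (l.map pvCleanC) s.toList := by
  induction l with
  | nil => intro s; simp [realize_loop, pvLoopC]
  | cons t rest ih =>
    intro s
    simp only [realize_loop, List.map_cons, pvLoopC]
    rw [apply_ite String.toList, pv_len_split₀, pv_join2, pv_clean_toList t]
    have hsp : (" " : String).toList = [' '] := rfl
    have hnl : ("\n" : String).toList = ['\n'] := rfl
    rw [hsp, show s.toList ++ [' '] ++ pvCleanC t = s.toList ++ ' ' :: pvCleanC t from by simp]
    split_ifs with h
    · rfl
    · rw [ih, pv_join2, hnl, pv_clean_toList t]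
      congr 1
      simp

theorem pv_wc_nil : pvWc ([] : List Char) = 0 := rfl

theorem pv_strip_flat_join (l : List (List Char)) :
    PySem.Chars.strip (l.flatMap (fun c => '\n' :: c))
      = PySem.Chars.strip (PySem.Chars.join ['\n'] l) := by
  cases l with
  | nil => simp [PySem.Chars.join_nil]
  | cons a rest => rw [pv_flat_join rest a, pv_strip_nl_cons]

theorem pv_a_toList (l : List (Int × String)) (mw : Int) :
    (realize l mw).toList
      = PySem.Chars.strip (PySem.Chars.join ['\n']
          ((l.map pvCleanC).take (pvCut mw 0 (l.map pvCleanC)))) := by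
  have h0 : (realize l mw).toList
      = PySem.Chars.strip (pvLoopC mw (l.map pvCleanC) []) := by
    simp only [realize, PySem.Str.toList_strip, pv_loop_toList]
    rfl
  rw [h0, pv_loopC_eq, pv_foldl_flat]
  have : ((pvWc ([] : List Char) : Int)) = 0 := by rw [pv_wc_nil]; rfl
  rw [this]
  simp only [List.nil_append]
  exact pv_strip_flat_join _

theorem pv_alt_toList (l : List (Int × String)) (mw : Int) :
    (realize_alt l mw).toList
      = PySem.Chars.strip (PySem.Chars.join ['\n']
          ((l.map pvCleanC).take (pvCut mw 0 (l.map pvCleanC)))) := by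
  simp only [realize_alt]
  set C := l.map (fun t => PySem.Str.strip (PySem.Str.replace t.2 "\n" " ")) with hC
  have hcs : C.map String.toList = l.map pvCleanC := by
    rw [hC, List.map_map]
    exact List.map_congr_left (fun t _ => pv_clean_toList t)
  have hcounts : C.map (fun c => PySem.List.len (PySem.Str.split₀ c))
      = (l.map pvCleanC).map (fun c => (pvWc c : Int)) := by
    calc C.map (fun c => PySem.List.len (PySem.Str.split₀ c))
        = C.map (fun c => ((pvWc c.toList : Nat) : Int)) :=
          List.map_congr_left (fun c _ => pv_len_split₀ c)
      _ = (C.map String.toList).map (fun c => (pvWc c : Int)) := by simp only [hC, List.map_map]; rfl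
      _ = _ := by rw [hcs]
  rw [hcounts, pv_prefix_foldl, List.nil_append, pv_cut_eq]
  rw [PySem.Str.toList_strip, PySem.Str.toList_join]
  have hnl : ("\n" : String).toList = ['\n'] := rfl
  rw [hnl, List.map_take, hcs]

-- ===== VERDICT (by name: the statement is the Claim_ definition above) =====
theorem realize_spec : Claim_equal_realize := by
  intro l mw _
  unfold Spec_realize
  apply String.toList_inj.mp
  rw [pv_a_toList, pv_alt_toList]
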